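-- pv_equiv track=rewrite | github.com/tobast/weechat-logexport | logexport.py | unlines
-- ===== SOURCE A (Python) =====
-- def unlines(msg):
--     """ Remove singne \n, keep only double \n's """
--     out = ""
--     for pos in range(len(msg)):
--         ch = msg[pos]
--         if ch == '\n' and (pos == 0 or msg[pos-1] != '\n'):
--             continue
--         out += msg[pos]
--     return out
-- ===== SOURCE B (Python) =====
-- def unlines(msg):
--     """ Remove singne \n, keep only double \n's """
--     out = []
--     i = 0
--     n = len(msg)
--     while i < n:
--         j = i
--         while j < n and msg[j] == msg[i]:
--             j += 1
--         k = j - i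
--         out.append('\n' * (k - 1) if msg[i] == '\n' else msg[i] * k)
--         i = j
--     return ''.join(out)
-- ===== Notes on version B (the rewrite author's own statement) =====
-- stated objective: alternative
-- what changed: B scans maximal runs of identical characters with two pointers and emits each run at once (a newline run of length k becomes k-1 newlines), joining pieces at the end, instead of A's per-character loop with an index lookback and string concatenation.
import Mathlib
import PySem

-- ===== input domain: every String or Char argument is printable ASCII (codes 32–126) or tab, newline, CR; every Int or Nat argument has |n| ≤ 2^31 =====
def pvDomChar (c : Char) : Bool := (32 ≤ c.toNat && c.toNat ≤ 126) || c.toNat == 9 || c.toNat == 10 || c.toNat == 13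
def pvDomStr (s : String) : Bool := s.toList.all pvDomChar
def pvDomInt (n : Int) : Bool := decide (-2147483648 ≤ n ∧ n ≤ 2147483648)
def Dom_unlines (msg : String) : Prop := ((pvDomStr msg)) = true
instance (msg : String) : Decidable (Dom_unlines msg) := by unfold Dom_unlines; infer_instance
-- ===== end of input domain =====

-- B drops each newline run to length k-1 by scanning maximal runs with two pointers
-- instead of A's per-character index lookback; alternative decomposition, same result.

-- ===== PORT A =====
def unlines (msg : String) : String :=
  String.ofList <|
    (PySem.List.pyRange 0 (PySem.Str.len msg) 1).foldl
      (fun out pos =>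
        let ch := PySem.List.pyGetD msg.toList pos ' '
        if ch = '\n' ∧ (pos = 0 ∨ ¬ PySem.List.pyGetD msg.toList (pos - 1) ' ' = '\n')
        then out
        else out ++ [PySem.List.pyGetD msg.toList pos ' ']) []

-- ===== PORT B =====
-- the outer while-loop of Source B: take the maximal run msg[i:j] of the character msg[i],
-- emit it (shortened by one for a newline run), continue after the run
def unlinesAltGo : List Char → List Char
  | [] => []
  | c :: cs =>
    let run := cs.takeWhile (· == c)
    let rest := cs.dropWhile (· == c)
    (if c = '\n' then List.replicate run.length '\n'
     else List.replicate (run.length + 1) c) ++ unlinesAltGo rest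
termination_by l => l.length
decreasing_by
  exact Nat.lt_succ_of_le (cs.length_dropWhile_le (· == c))

def unlines_alt (msg : String) : String :=
  String.ofList (unlinesAltGo msg.toList)

-- ===== PRECONDITION & SPEC =====
def Spec_unlines (msg : String) (out : String) : Prop := out = unlines_alt msg
instance (msg : String) (out : String) : Decidable (Spec_unlines msg out) := by unfold Spec_unlines; infer_instance

-- ===== CLAIM (what is proved, stated in full; the proofs are below) =====
def Claim_equal_unlines : Prop := ∀ (msg : String), Dom_unlines msg → Spec_unlines msg (unlines msg)

-- ===== LEMMAS AND PROOFS =====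

-- A's loop, rephrased as a recursion carrying only 'previous character was a newline'
def auxA (b : Bool) : List Char → List Char
  | [] => []
  | c :: cs => (if c = '\n' ∧ b = false then [] else [c]) ++ auxA (c == '\n') cs

lemma foldA_eq (l : List Char) :
    ∀ (v u acc : List Char), l = u ++ v →
      (PySem.List.pyRange (u.length : Int) (l.length : Int) 1).foldl
        (fun out pos =>
          let ch := PySem.List.pyGetD l pos ' '
          if ch = '\n' ∧ (pos = 0 ∨ ¬ PySem.List.pyGetD l (pos - 1) ' ' = '\n')
          then out
          else out ++ [PySem.List.pyGetD l pos ' ']) acc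
      = acc ++ auxA (u.getLast? == some '\n') v := by
  intro v
  induction v with
  | nil =>
    intro u acc h
    subst h
    rw [PySem.List.pyRange_one_eq_nil (by simp)]
    simp [auxA]
  | cons c cs ih =>
    intro u acc h
    have hlen : (u.length : Int) < ((u ++ c :: cs).length : Int) := by
      simp
    subst h
    rw [PySem.List.pyRange_one_cons hlen]
    simp only [List.foldl_cons]
    have hget : PySem.List.pyGetD (u ++ c :: cs) (u.length : Int) ' ' = c := by
      rw [PySem.List.pyGetD_natCast]
      simp [List.getD]
    have hcond : ((u.length : Int) = 0 ∨
        ¬ PySem.List.pyGetD (u ++ c :: cs) ((u.length : Int) - 1) ' ' = '\n')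
        ↔ (u.getLast? == some '\n') = false := by
      rcases u.eq_nil_or_concat with rfl | ⟨u', d, rfl⟩
      · simp
      · simp only [List.concat_eq_append] at *
        have h1 : ((u' ++ [d]).length : Int) - 1 = ((u'.length : Nat) : Int) := by
          simp
        have h2 : PySem.List.pyGetD ((u' ++ [d]) ++ c :: cs) ((u'.length : Nat) : Int) ' ' = d := by
          rw [PySem.List.pyGetD_natCast]
          simp [List.getD, List.append_assoc]
        rw [h1, h2]
        simp only [List.getLast?_append, List.getLast?_singleton, List.length_append,
          List.length_singleton]
        constructor
        · intro h
          rcases h with h | h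
          · push_cast at h; omega
          · simp [h]
        · intro h
          right
          simpa using h
    have step : (if PySem.List.pyGetD (u ++ c :: cs) (u.length : Int) ' ' = '\n' ∧
          ((u.length : Int) = 0 ∨
            ¬ PySem.List.pyGetD (u ++ c :: cs) ((u.length : Int) - 1) ' ' = '\n')
        then acc
        else acc ++ [PySem.List.pyGetD (u ++ c :: cs) (u.length : Int) ' '])
        = acc ++ (if c = '\n' ∧ (u.getLast? == some '\n') = false then [] else [c]) := by
      rw [hget]
      by_cases hc : c = '\n' ∧ (u.getLast? == some '\n') = false
      · rw [if_pos hc, if_pos ⟨hc.1, hcond.mpr hc.2⟩, List.append_nil]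
      · rw [if_neg hc, if_neg (fun h => hc ⟨h.1, hcond.mp h.2⟩)]
    have hlen2 : ((u ++ [c]).length : Int) = (u.length : Int) + 1 := by simp
    have := ih (u ++ [c]) (acc ++ (if c = '\n' ∧ (u.getLast? == some '\n') = false then [] else [c]))
      (by simp)
    rw [hlen2] at this
    simp only [step, List.append_assoc] at this ⊢
    rw [this]
    simp [auxA]

-- a run of characters ≠ '\n' is emitted whole, and resets the flag
lemma aux_run_notnl (c : Char) (hc : c ≠ '\n') :
    ∀ (run : List Char) (rest : List Char) (b : Bool), (∀ x ∈ run, x = c) →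
      auxA b (c :: run ++ rest) = c :: run ++ auxA false rest := by
  have hb : (c == '\n') = false := beq_eq_false_iff_ne.mpr hc
  intro run
  induction run with
  | nil =>
    intro rest b _
    simp only [List.singleton_append]
    rw [auxA, if_neg (by simp [hc]), hb]
    rfl
  | cons d run' ih =>
    intro rest b hall
    have hd : d = c := hall d (by simp)
    rw [hd]
    have h2 := ih rest false (fun x hx => hall x (List.mem_cons_of_mem _ hx))
    rw [List.cons_append, auxA, if_neg (by simp [hc]), hb, h2]
    simp

-- after a newline, a run of newlines is emitted whole and the flag stays set
lemma aux_run_nl :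
    ∀ (run rest : List Char), (∀ x ∈ run, x = '\n') →
      auxA true (run ++ rest) = run ++ auxA true rest := by
  intro run
  induction run with
  | nil => intro rest _; simp
  | cons d run' ih =>
    intro rest hall
    have hd : d = '\n' := hall d (by simp)
    subst hd
    rw [List.cons_append, auxA, if_neg (by simp), beq_self_eq_true,
      ih rest (fun x hx => hall x (List.mem_cons_of_mem _ hx))]
    simp

-- the flag is irrelevant when the next character is not a newline
lemma aux_flag_irrel :
    ∀ (rest : List Char), (∀ h, rest.head? = some h → h ≠ '\n') →
      auxA true rest = auxA false rest := by
  intro rest h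
  cases rest with
  | nil => rfl
  | cons x t =>
    have hx : x ≠ '\n' := h x rfl
    simp [auxA, hx]

lemma aux_eq_go_aux : ∀ (n : Nat) (l : List Char), l.length ≤ n → auxA false l = unlinesAltGo l := by
  intro n
  induction n with
  | zero =>
    intro l hl
    have : l = [] := List.eq_nil_of_length_eq_zero (Nat.le_zero.mp hl)
    subst this
    simp [auxA, unlinesAltGo]
  | succ n ih =>
    intro l hl
    match l with
    | [] => simp [auxA, unlinesAltGo]
    | c :: cs =>
      have hsplit : cs = cs.takeWhile (· == c) ++ cs.dropWhile (· == c) :=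
        (List.takeWhile_append_dropWhile).symm
      have hall : ∀ x ∈ cs.takeWhile (· == c), x = c := by
        intro x hx
        have := List.mem_takeWhile_imp hx
        simpa using this
      have hhead : ∀ h, (cs.dropWhile (· == c)).head? = some h → h ≠ c := by
        intro h hh
        have := List.head?_dropWhile_not (· == c) cs
        rw [hh] at this
        simpa using this
      have hle : (cs.dropWhile (· == c)).length ≤ n :=
        Nat.le_of_lt_succ (Nat.lt_of_lt_of_le
          (Nat.lt_succ_of_le (cs.length_dropWhile_le (· == c))) hl)
      by_cases hc : c = '\n'
      · subst hc
        calc auxA false ('\n' :: cs)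
            = auxA false ('\n' :: (cs.takeWhile (· == '\n') ++ cs.dropWhile (· == '\n'))) := by
              rw [← hsplit]
          _ = auxA true (cs.takeWhile (· == '\n') ++ cs.dropWhile (· == '\n')) := by
              rw [auxA, if_pos (by simp), beq_self_eq_true]; simp
          _ = cs.takeWhile (· == '\n') ++ auxA true (cs.dropWhile (· == '\n')) :=
              aux_run_nl _ _ hall
          _ = cs.takeWhile (· == '\n') ++ auxA false (cs.dropWhile (· == '\n')) := by
              rw [aux_flag_irrel _ hhead]
          _ = cs.takeWhile (· == '\n') ++ unlinesAltGo (cs.dropWhile (· == '\n')) := by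
              rw [ih _ hle]
          _ = unlinesAltGo ('\n' :: cs) := by
              have hrep := List.eq_replicate_of_mem hall
              conv_rhs => rw [unlinesAltGo]
              simp [← hrep]
      · calc auxA false (c :: cs)
            = auxA false (c :: (cs.takeWhile (· == c) ++ cs.dropWhile (· == c))) := by
              rw [← hsplit]
          _ = c :: cs.takeWhile (· == c) ++ auxA false (cs.dropWhile (· == c)) :=
              aux_run_notnl c hc _ _ false hall
          _ = c :: cs.takeWhile (· == c) ++ unlinesAltGo (cs.dropWhile (· == c)) := by
              rw [ih _ hle]
          _ = unlinesAltGo (c :: cs) := by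
              have hrep := List.eq_replicate_of_mem hall
              conv_rhs => rw [unlinesAltGo]
              simp [hc, List.replicate_succ, ← hrep]

lemma aux_eq_go (l : List Char) : auxA false l = unlinesAltGo l :=
  aux_eq_go_aux l.length l (Nat.le_refl _)

-- ===== VERDICT (by name: the statement is the Claim_ definition above) =====
theorem unlines_spec : Claim_equal_unlines := by
  intro msg _
  unfold Spec_unlines unlines unlines_alt
  have h := foldA_eq msg.toList msg.toList [] [] (by simp)
  rw [PySem.Str.len_eq]
  simp only [List.length_nil, Nat.cast_zero, List.nil_append] at h
  rw [h]
  simp [aux_eq_go]
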